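-- pv_equiv track=rewrite | github.com/Gafclerck/sub | ip_fonctions.py | base2
-- ===== SOURCE A (Python) =====
-- def base2(a):
--     retour = 0
--     i = 0
--     while a != 0:
--         c = a % 2
--         if c == 1:
--             retour += 10 ** i
--         a = a // 2
--         i += 1
--     return retour
-- ===== SOURCE B (Python) =====
-- def base2(a):
--     # recursive: least-significant bit is the units decimal digit,
--     # higher bits shifted up by *10 via the recursion
--     if a == 0:
--         return 0
--     return a % 2 + 10 * base2(a // 2)
-- ===== Notes on version B (the rewrite author's own statement) =====
-- stated objective: simpler
-- what changed: Replaces the while loop with explicit accumulator and 10**i power by a direct recursion a%2 + 10*base2(a//2) with no index or power variable.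
import Mathlib
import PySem

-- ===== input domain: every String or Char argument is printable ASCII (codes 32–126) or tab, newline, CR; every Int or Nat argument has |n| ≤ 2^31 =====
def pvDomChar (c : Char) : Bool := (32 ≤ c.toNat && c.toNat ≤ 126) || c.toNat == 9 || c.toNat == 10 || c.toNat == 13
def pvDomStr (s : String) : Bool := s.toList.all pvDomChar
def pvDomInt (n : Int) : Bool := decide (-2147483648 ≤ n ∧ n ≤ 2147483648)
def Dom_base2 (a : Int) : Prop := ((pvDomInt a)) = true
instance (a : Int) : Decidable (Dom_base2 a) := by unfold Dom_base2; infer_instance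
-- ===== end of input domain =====

-- B replaces A's while loop (accumulator + 10**i power) by the direct recursion
-- a%2 + 10*base2(a//2): simpler, no index or power variable. On negative a
-- neither Python returns (A loops forever, B exhausts recursion); both ports
-- are totalised there by the same guard and still agree, so no Pre_ is needed.


-- ===== PORT A =====
-- while a != 0: for a < 0 the Python loop never terminates;
-- the 'a ≤ 0' guard only makes the Lean function total there (returning retour).
def base2Loop (a retour : Int) (i : Nat) : Int :=
  if a ≤ 0 then retour
  else base2Loop (PySem.Int.floordiv a 2)
      (retour + if PySem.Int.mod a 2 = 1 then 10 ^ i else 0) (i + 1)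
termination_by a.toNat
decreasing_by
  rename_i h
  rw [PySem.Int.floordiv_eq_ediv_of_pos (by omega)]
  omega

def base2 (a : Int) : Int := base2Loop a 0 0

-- ===== PORT B =====
-- base case a == 0; for a < 0 the Python recursion never returns (RecursionError);
-- the 'a ≤ 0' guard totalises the Lean function there the same way as A's port.
def base2_alt (a : Int) : Int :=
  if a ≤ 0 then 0
  else PySem.Int.mod a 2 + 10 * base2_alt (PySem.Int.floordiv a 2)
termination_by a.toNat
decreasing_by
  rename_i h
  rw [PySem.Int.floordiv_eq_ediv_of_pos (by omega)]
  omega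

-- ===== PRECONDITION & SPEC =====
def Spec_base2 (a : Int) (out : Int) : Prop := out = base2_alt a
instance (a : Int) (out : Int) : Decidable (Spec_base2 a out) := by unfold Spec_base2; infer_instance

-- ===== CLAIM (what is proved, stated in full; the proofs are below) =====
def Claim_equal_base2 : Prop := ∀ (a : Int), Dom_base2 a → Spec_base2 a (base2 a)

-- ===== LEMMAS AND PROOFS =====

-- loop invariant: the accumulator-and-power loop computes retour + 10^i * (recursive value)
theorem base2Loop_eq (a : Int) (retour : Int) (i : Nat) :
    base2Loop a retour i = retour + 10 ^ i * base2_alt a := by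
  by_cases h : a ≤ 0
  · rw [base2Loop, base2_alt]
    simp [h]
  · rw [base2Loop, base2_alt, if_neg h, if_neg h,
      base2Loop_eq (PySem.Int.floordiv a 2)]
    have hm := PySem.Int.mod_nonneg a (b := 2) (by omega)
    have hl := PySem.Int.mod_lt a (b := 2) (by omega)
    rcases (by omega : PySem.Int.mod a 2 = 0 ∨ PySem.Int.mod a 2 = 1) with hv | hv <;>
      rw [hv] <;> norm_num [pow_succ] <;> ring
termination_by a.toNat
decreasing_by
  rw [PySem.Int.floordiv_eq_ediv_of_pos (by omega)]
  omega

-- ===== VERDICT (by name: the statement is the Claim_ definition above) =====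
theorem base2_spec : Claim_equal_base2 := by
  intro a _
  unfold Spec_base2 base2
  rw [base2Loop_eq]
  norm_num
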